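-- pv_equiv track=rewrite | github.com/TEESlab-UPRC/DREEM | auxiliary.py | gethours
-- ===== SOURCE A (Python) =====
-- def gethours(hr):
--     cnt = 0
--     for i in range(len(hr)-1):
--         if hr[i] != hr[i+1]:
--             cnt += 1
--     hours = [0 for k in range(cnt)]
--     j = 0
--     for i in range(len(hr)-1):
--         if hr[i] != hr[i+1]:
--             hours[j] = hr[i]
--             j += 1
--     return hours
-- ===== SOURCE B (Python) =====
-- def gethours(hr):
--     res = []
--     for a, b in zip(hr, hr[1:]):
--         if a != b:
--             res.append(a)
--     return res
-- ===== Notes on version B (the rewrite author's own statement) =====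
-- stated objective: simpler
-- what changed: Replaces A's two index passes (a counting pass, then a pre-allocated zero-filled list mutated via a manual write cursor j) with one pass over adjacent pairs that appends each differing left neighbour to an initially empty list.
import Mathlib
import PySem

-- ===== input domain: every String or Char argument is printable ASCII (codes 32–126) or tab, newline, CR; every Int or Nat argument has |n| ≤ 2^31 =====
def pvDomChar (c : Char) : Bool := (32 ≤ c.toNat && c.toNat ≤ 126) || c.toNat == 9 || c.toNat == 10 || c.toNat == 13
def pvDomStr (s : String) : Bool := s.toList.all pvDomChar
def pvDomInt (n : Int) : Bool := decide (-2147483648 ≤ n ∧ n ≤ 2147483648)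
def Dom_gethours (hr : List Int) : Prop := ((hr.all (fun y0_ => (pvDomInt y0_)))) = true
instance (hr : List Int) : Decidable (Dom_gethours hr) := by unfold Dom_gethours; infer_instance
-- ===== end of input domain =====

-- B replaces A's two index passes (count, then fill a pre-allocated zero list via cursor j)
-- with a single append loop over adjacent pairs; objective: simpler.

-- ===== PORT A =====
-- literal transliteration of Source A: indices i, i+1 are always in range, so hr[i] is pyGetD
-- (exact here) and hours[j] = v is pySetD (exact: j is always a valid index of hours).
def gethours (hr : List Int) : List Int :=
  let cnt : Int :=
    (PySem.List.pyRange 0 ((hr.length : Int) - 1) 1).foldl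
      (fun c i =>
        if PySem.List.pyGetD hr i 0 ≠ PySem.List.pyGetD hr (i + 1) 0 then c + 1 else c) 0
  let hours : List Int := (PySem.List.pyRange 0 cnt 1).map (fun _ => 0)
  let res :=
    (PySem.List.pyRange 0 ((hr.length : Int) - 1) 1).foldl
      (fun (s : List Int × Int) i =>
        if PySem.List.pyGetD hr i 0 ≠ PySem.List.pyGetD hr (i + 1) 0 then
          (PySem.List.pySetD s.1 s.2 (PySem.List.pyGetD hr i 0), s.2 + 1)
        else s)
      (hours, 0)
  res.1

-- ===== PORT B =====
-- transliteration of Source B: zip(hr, hr[1:]) then one append loop.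
def gethours_alt (hr : List Int) : List Int :=
  (hr.zip (PySem.List.slice hr (some 1) none)).foldl
    (fun res p => if p.1 ≠ p.2 then res ++ [p.1] else res) []

-- ===== PRECONDITION & SPEC =====
def Spec_gethours (hr : List Int) (out : List Int) : Prop := out = gethours_alt hr
instance (hr : List Int) (out : List Int) : Decidable (Spec_gethours hr out) := by unfold Spec_gethours; infer_instance

-- ===== CLAIM (what is proved, stated in full; the proofs are below) =====
def Claim_equal_gethours : Prop := ∀ (hr : List Int), Dom_gethours hr → Spec_gethours hr (gethours hr)

-- ===== LEMMAS AND PROOFS =====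

-- the common normal form: first components of the differing adjacent pairs
def pvDiffs (hr : List Int) : List Int :=
  ((hr.zip hr.tail).filter (fun p => p.1 ≠ p.2)).map (·.1)

lemma gethours_alt_eq (hr : List Int) : gethours_alt hr = pvDiffs hr := by
  unfold gethours_alt pvDiffs
  rw [PySem.List.slice_from_one]
  rw [show (fun (res : List Int) (p : Int × Int) => if p.1 ≠ p.2 then res ++ [p.1] else res)
      = (fun (acc : List Int) (x : Int × Int) =>
          if (fun q : Int × Int => decide (q.1 ≠ q.2)) x = true then acc ++ [x.1] else acc) from by
        funext acc x; by_cases h : x.1 = x.2 <;> simp [h]]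
  rw [PySem.List.foldl_append_if]
  simp

-- A's fill loop, run from a prefix `done` already written and cursor j = done.length,
-- with exactly countP zero slots left, appends the differing firsts after `done`.
lemma fill_loop (ps : List (Int × Int)) (done : List Int) :
    (ps.foldl
      (fun (s : List Int × Int) p =>
        if p.1 ≠ p.2 then (PySem.List.pySetD s.1 s.2 p.1, s.2 + 1) else s)
      (done ++ List.replicate (ps.countP (fun p => p.1 ≠ p.2)) 0, (done.length : Int))).1
    = done ++ (ps.filter (fun p => p.1 ≠ p.2)).map (·.1) := by
  induction ps generalizing done with
  | nil => simp
  | cons p t ih =>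
    by_cases h : p.1 = p.2
    · have hc : (p :: t).countP (fun q => q.1 ≠ q.2) = t.countP (fun q => q.1 ≠ q.2) := by
        simp [h]
      rw [hc, List.foldl_cons, if_neg (not_not_intro h), ih done]
      simp [h]
    · have hc : (p :: t).countP (fun q => q.1 ≠ q.2) = t.countP (fun q => q.1 ≠ q.2) + 1 := by
        simp [h]
      have hset : PySem.List.pySetD
            (done ++ List.replicate (t.countP (fun q => q.1 ≠ q.2) + 1) 0)
            ((done.length : Int)) p.1
          = (done ++ [p.1]) ++ List.replicate (t.countP (fun q => q.1 ≠ q.2)) 0 := by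
        rw [PySem.List.pySetD_natCast, List.set_append]
        simp [List.replicate_succ]
      rw [hc, List.foldl_cons, if_pos h, hset,
          show ((done.length : Int)) + 1 = (((done ++ [p.1]).length : Nat) : Int) by simp,
          ih (done ++ [p.1])]
      simp [h]

-- a fold over range(len(hr)-1) reading hr[i], hr[i+1] is a fold over hr.zip hr.tail
lemma foldl_range_pairs {β : Type} (hr : List Int) (f : β → Int × Int → β) (init : β) :
    (PySem.List.pyRange 0 ((hr.length : Int) - 1) 1).foldl
      (fun acc i => f acc (PySem.List.pyGetD hr i 0, PySem.List.pyGetD hr (i + 1) 0)) init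
    = (hr.zip hr.tail).foldl f init := by
  cases hr with
  | nil => simp [PySem.List.pyRange_one_eq_nil]
  | cons a t =>
    have hlen : ((a :: t).length : Int) - 1 = PySem.List.len ((a :: t).zip (a :: t).tail) := by
      simp [PySem.List.len_eq, List.length_zip]
    rw [hlen, ← PySem.List.foldl_pyRange_zero_pyGetD ((a :: t).zip (a :: t).tail) (0, 0) f init]
    apply PySem.List.foldl_congr_mem
    intro acc i hi
    have hmem := PySem.List.mem_pyRange_one.mp hi
    have h0 : 0 ≤ i := hmem.1
    have h1 : i < ((a :: t).length : Int) - 1 := by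
      have := hmem.2
      rw [PySem.List.len_eq] at this
      simp only [List.length_zip, List.tail_cons, List.length_cons] at this ⊢
      push_cast at this ⊢
      omega
    have hz : i < (((a :: t).zip (a :: t).tail).length : Int) := by
      simp only [List.length_zip, List.tail_cons, List.length_cons] at h1 ⊢
      push_cast at h1 ⊢
      omega
    have hin : i < ((a :: t).length : Int) := by
      simp only [List.length_cons] at h1 ⊢; push_cast at h1 ⊢; omega
    have hin1 : i + 1 < ((a :: t).length : Int) := by
      simp only [List.length_cons] at h1 ⊢; push_cast at h1 ⊢; omega
    rw [PySem.List.pyGetD_eq_getElem _ _ h0 hz,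
        PySem.List.pyGetD_eq_getElem _ _ h0 hin,
        PySem.List.pyGetD_eq_getElem _ _ (by omega) hin1]
    have hstep : (i + 1).toNat = i.toNat + 1 := by omega
    simp [List.getElem_zip, hstep]

lemma gethours_eq (hr : List Int) : gethours hr = pvDiffs hr := by
  simp only [gethours]
  rw [show (fun (c : Int) i =>
        if PySem.List.pyGetD hr i 0 ≠ PySem.List.pyGetD hr (i + 1) 0 then c + 1 else c)
      = (fun (c : Int) i =>
        (fun (c : Int) (p : Int × Int) => if p.1 ≠ p.2 then c + 1 else c) c
          (PySem.List.pyGetD hr i 0, PySem.List.pyGetD hr (i + 1) 0)) from rfl]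
  rw [foldl_range_pairs hr
        (fun (c : Int) (p : Int × Int) => if p.1 ≠ p.2 then c + 1 else c) 0]
  rw [show (fun (s : List Int × Int) i =>
        if PySem.List.pyGetD hr i 0 ≠ PySem.List.pyGetD hr (i + 1) 0 then
          (PySem.List.pySetD s.1 s.2 (PySem.List.pyGetD hr i 0), s.2 + 1)
        else s)
      = (fun (s : List Int × Int) i =>
        (fun (s : List Int × Int) (p : Int × Int) =>
          if p.1 ≠ p.2 then (PySem.List.pySetD s.1 s.2 p.1, s.2 + 1) else s) s
          (PySem.List.pyGetD hr i 0, PySem.List.pyGetD hr (i + 1) 0)) from rfl]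
  rw [foldl_range_pairs hr
        (fun (s : List Int × Int) (p : Int × Int) =>
          if p.1 ≠ p.2 then (PySem.List.pySetD s.1 s.2 p.1, s.2 + 1) else s) (_, 0)]
  rw [show (fun (c : Int) (p : Int × Int) => if p.1 ≠ p.2 then c + 1 else c)
      = (fun (c : Int) (p : Int × Int) =>
          if (fun q : Int × Int => decide (q.1 ≠ q.2)) p = true then c + 1 else c) from by
        funext c p; by_cases h : p.1 = p.2 <;> simp [h]]
  rw [PySem.List.foldl_count_if]
  rw [show ((0 : Int) + ((hr.zip hr.tail).countP (fun q : Int × Int => decide (q.1 ≠ q.2)) : Int))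
      = (((hr.zip hr.tail).countP (fun q : Int × Int => decide (q.1 ≠ q.2)) : Nat) : Int) by omega]
  rw [List.map_const', PySem.List.length_pyRange_one,
      show ((((hr.zip hr.tail).countP (fun q : Int × Int => decide (q.1 ≠ q.2)) : Nat) : Int) - 0).toNat
        = (hr.zip hr.tail).countP (fun q : Int × Int => decide (q.1 ≠ q.2)) by omega]
  have := fill_loop (hr.zip hr.tail) []
  simp only [List.nil_append, List.length_nil, Nat.cast_zero] at this
  rw [this]
  rfl

-- ===== VERDICT (by name: the statement is the Claim_ definition above) =====
theorem gethours_spec : Claim_equal_gethours := by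
  intro hr _
  unfold Spec_gethours
  rw [gethours_eq, gethours_alt_eq]
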